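-- pv_equiv track=rewrite | github.com/legubelim/advent | 2023/day_14.py | tilt_row
-- ===== SOURCE A (Python) =====
-- def tilt_row(row_in: [str], reverse=False) -> [str]:
--     if reverse:
--         row = list(reversed(row_in))
--     else:
--         row = row_in.copy()
--     for i in range(len(row)-1, -1, -1):
--         c = row[i]
--         if c == 'O':
--             dest = i
--             for i_to in range(i+1, len(row)):
--                 if row[i_to] != '.':
--                     break
--                 else:
--                     dest = i_to
--             if dest != i:
--                 row[dest] = 'O'
--                 row[i] = '.'
--     if reverse:
--         row = list(reversed(row))
--     return row
-- ===== SOURCE B (Python) =====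
-- def tilt_row(row_in: [str], reverse=False) -> [str]:
--     # One pass over the row: count '.' and 'O' in each barrier-delimited
--     # segment and emit dots then rocks (instead of sliding each rock).
--     row = row_in[::-1] if reverse else row_in
--     out = []
--     dots = 0
--     rocks = 0
--     for c in row:
--         if c == '.':
--             dots += 1
--         elif c == 'O':
--             rocks += 1
--         else:
--             out.extend(['.'] * dots)
--             out.extend(['O'] * rocks)
--             dots = 0
--             rocks = 0
--             out.append(c)
--     out.extend(['.'] * dots)
--     out.extend(['O'] * rocks)
--     return out[::-1] if reverse else out
-- ===== Notes on version B (the rewrite author's own statement) =====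
-- stated objective: alternative
-- what changed: Replaced A's per-rock rightward scan over the dots ahead of each 'O' with a single left-to-right pass that counts '.' and 'O' per barrier-delimited segment and emits dots then rocks.
import Mathlib
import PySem

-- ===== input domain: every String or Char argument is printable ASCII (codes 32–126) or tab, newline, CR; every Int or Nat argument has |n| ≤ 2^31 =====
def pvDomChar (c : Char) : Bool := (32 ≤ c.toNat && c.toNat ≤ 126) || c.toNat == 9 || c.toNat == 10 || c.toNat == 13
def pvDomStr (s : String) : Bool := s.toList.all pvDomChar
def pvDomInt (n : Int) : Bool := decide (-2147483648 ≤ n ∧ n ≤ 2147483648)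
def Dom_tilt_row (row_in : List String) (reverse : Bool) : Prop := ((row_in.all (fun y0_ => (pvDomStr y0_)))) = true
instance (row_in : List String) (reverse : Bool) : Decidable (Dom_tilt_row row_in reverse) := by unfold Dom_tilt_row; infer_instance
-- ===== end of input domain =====

-- B replaces A's per-rock rightward scan with one pass that counts '.'/'O' per
-- barrier-delimited segment and emits dots-then-rocks (objective: alternative).
-- Neither version mutates its argument.

-- ===== PORT A =====
-- inner 'for i_to in range(i+1, len(row))' loop with its break, carrying 'dest'
def tiltInnerA (row : List String) : List Int → Int → Int
  | [], dest => dest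
  | iTo :: rest, dest =>
      if PySem.List.pyGetD row iTo "" ≠ "." then dest
      else tiltInnerA row rest iTo

-- one iteration of the outer 'for i in range(len(row)-1, -1, -1)' loop
def tiltStepA (row : List String) (i : Int) : List String :=
  let c := PySem.List.pyGetD row i ""
  if c = "O" then
    let dest := tiltInnerA row (PySem.List.pyRange (i + 1) (row.length : Int) 1) i
    if dest ≠ i then (row.set (dest.toNat) "O").set i.toNat "." else row
  else row

def tilt_row (row_in : List String) (reverse : Bool) : List String :=
  let row := if reverse then row_in.reverse else row_in
  let row := (PySem.List.pyRange ((row.length : Int) - 1) (-1) (-1)).foldl tiltStepA row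
  if reverse then row.reverse else row

-- ===== PORT B =====
-- one iteration of B's single pass: state = (out, dots, rocks)
def tiltStepB (st : List String × Nat × Nat) (c : String) : List String × Nat × Nat :=
  let (out, dots, rocks) := st
  if c = "." then (out, dots + 1, rocks)
  else if c = "O" then (out, dots, rocks + 1)
  else (out ++ List.replicate dots "." ++ List.replicate rocks "O" ++ [c], 0, 0)

def tilt_row_alt (row_in : List String) (reverse : Bool) : List String :=
  let row := if reverse then row_in.reverse else row_in
  let st := row.foldl tiltStepB ([], 0, 0)
  let out := st.1 ++ List.replicate st.2.1 "." ++ List.replicate st.2.2 "O"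
  if reverse then out.reverse else out

-- ===== PRECONDITION & SPEC =====
def Spec_tilt_row (row_in : List String) (reverse : Bool) (out : List String) : Prop := out = tilt_row_alt row_in reverse
instance (row_in : List String) (reverse : Bool) (out : List String) : Decidable (Spec_tilt_row row_in reverse out) := by unfold Spec_tilt_row; infer_instance

-- ===== CLAIM (what is proved, stated in full; the proofs are below) =====
def Claim_equal_tilt_row : Prop := ∀ (row_in : List String) (reverse : Bool), Dom_tilt_row row_in reverse → Spec_tilt_row row_in reverse (tilt_row row_in reverse)

-- ===== LEMMAS AND PROOFS =====

-- canonical tilt: each 'O' slides right over '.' until the next non-'.' cell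
def push (l : List String) : List String :=
  l.takeWhile (· == ".") ++ "O" :: l.dropWhile (· == ".")

def tiltT : List String → List String
  | [] => []
  | c :: r => if c = "O" then push (tiltT r) else c :: tiltT r

def pushN : Nat → List String → List String
  | 0, l => l
  | n + 1, l => pushN n (push l)

theorem push_cons_dot (x : List String) : push ("." :: x) = "." :: push x := by
  simp [push, List.takeWhile, List.dropWhile]

theorem pushN_cons_dot (n : Nat) (x : List String) :
    pushN n ("." :: x) = "." :: pushN n x := by
  induction n generalizing x with
  | zero => rfl
  | succ n ih => simp [pushN, push_cons_dot, ih]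

theorem pushN_block (n : Nat) (y : List String) (h : y.takeWhile (· == ".") = []) :
    pushN n y = List.replicate n "O" ++ y := by
  induction n generalizing y with
  | zero => simp [pushN]
  | succ n ih =>
      have hp : push y = "O" :: y := by
        have hd : y.dropWhile (· == ".") = y := by
          cases y with
          | nil => rfl
          | cons a t =>
            simp only [List.takeWhile] at h
            cases hA : (a == ".") with
            | true => rw [hA] at h; simp at h
            | false => simp [List.dropWhile, hA]
        simp [push, h, hd]
      rw [pushN, hp, ih ("O" :: y) (by simp [List.takeWhile])]
      rw [List.replicate_succ']
      simp

-- B's fold, flushed, equals the canonical tilt (with the carried counters prepended)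
theorem Bfold_eq (l : List String) (out : List String) (d k : Nat) :
    (l.foldl tiltStepB (out, d, k)).1
      ++ List.replicate (l.foldl tiltStepB (out, d, k)).2.1 "."
      ++ List.replicate (l.foldl tiltStepB (out, d, k)).2.2 "O"
    = out ++ List.replicate d "." ++ pushN k (tiltT l) := by
  induction l generalizing out d k with
  | nil => simp [pushN_block k [] rfl, tiltT]
  | cons c r ih =>
      rw [List.foldl_cons]
      by_cases hc : c = "."
      · subst hc
        rw [show tiltStepB (out, d, k) "." = (out, d + 1, k) from rfl, ih]
        rw [show tiltT ("." :: r) = "." :: tiltT r from by simp [tiltT]]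
        rw [pushN_cons_dot, List.replicate_succ' (n := d)]
        simp
      · by_cases hO : c = "O"
        · subst hO
          rw [show tiltStepB (out, d, k) "O" = (out, d, k + 1) from rfl, ih]
          rw [show tiltT ("O" :: r) = push (tiltT r) from by simp [tiltT]]
          rfl
        · rw [show tiltStepB (out, d, k) c
              = (out ++ List.replicate d "." ++ List.replicate k "O" ++ [c], 0, 0) from by
                simp [tiltStepB, hc, hO], ih]
          rw [show tiltT (c :: r) = c :: tiltT r from by simp [tiltT, hO]]
          have hbe : (c == ".") = false := beq_eq_false_iff_ne.mpr hc
          have ht : (c :: tiltT r).takeWhile (· == ".") = [] := by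
            simp [List.takeWhile, hbe]
          rw [pushN_block k _ ht]
          simp [pushN]

theorem getD_append_len (u : List String) (t : String) (x : List String) :
    (u ++ t :: x).getD u.length "" = t := by
  simp [List.getD]

-- A's inner loop returns the index of the last '.' of the run right of the rock
theorem inner_eq (tl u : List String) (dest : Int) :
    tiltInnerA (u ++ tl) (PySem.List.pyRange (u.length : Int) ((u.length : Int) + (tl.length : Int)) 1) dest
    = (if (tl.takeWhile (· == ".")).length = 0 then dest
       else (u.length : Int) + ((tl.takeWhile (· == ".")).length : Int) - 1) := by
  induction tl generalizing u dest with
  | nil =>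
      simp only [List.length_nil, Nat.cast_zero, add_zero]
      rw [PySem.List.pyRange_one_eq_nil le_rfl]
      simp [tiltInnerA]
  | cons t x ih =>
      rw [PySem.List.pyRange_one_cons (by simp)]
      rw [tiltInnerA]
      rw [show PySem.List.pyGetD (u ++ t :: x) (u.length : Int) "" = t from by
        rw [PySem.List.pyGetD_natCast]; exact getD_append_len u t x]
      by_cases ht : t = "."
      · subst ht
        rw [if_neg (by simp)]
        have h2 := ih (u ++ ["."]) (u.length : Int)
        have harr : ((u ++ ["."]).length : Int) = (u.length : Int) + 1 := by simp
        rw [harr] at h2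
        rw [show (u.length : Int) + (((("." : String)) :: x).length : Int)
              = (u.length : Int) + 1 + (x.length : Int) from by simp; omega]
        rw [show u ++ ("." : String) :: x = (u ++ ["."]) ++ x from by simp]
        rw [h2]
        have htw : (((("." : String)) :: x).takeWhile (· == ".")).length
            = (x.takeWhile (· == ".")).length + 1 := by
          simp [List.takeWhile]
        rw [htw]
        by_cases hz : (x.takeWhile (· == ".")).length = 0
        · simp [hz]
        · rw [if_neg hz, if_neg (by omega)]
          push_cast
          omega
      · have hbe : (t == ".") = false := beq_eq_false_iff_ne.mpr ht
        rw [if_pos (by simp [ht])]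
        simp [List.takeWhile, hbe]

theorem set_replicate_last (d : Nat) (a b : String) (h : 0 < d) (rest : List String) :
    (List.replicate d a ++ rest).set (d - 1) b = List.replicate (d - 1) a ++ b :: rest := by
  rw [List.set_append, if_pos (by simp; omega)]
  rw [show d = (d - 1) + 1 from by omega, List.replicate_succ']
  rw [List.set_append, if_neg (by simp)]
  simp

theorem takeWhile_dot_eq_replicate (tl : List String) :
    tl.takeWhile (· == ".") = List.replicate (tl.takeWhile (· == ".")).length "." := by
  rw [List.eq_replicate_iff]
  exact ⟨rfl, fun b hb => by simpa using (List.mem_takeWhile_imp hb)⟩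

-- one outer-loop iteration of A, on a row whose processed suffix is already tilted
theorem step_eq (v : List String) (c : String) (tl : List String) :
    tiltStepA (v ++ c :: tl) (v.length : Int)
    = v ++ (if c = "O" then push tl else c :: tl) := by
  have hget : PySem.List.pyGetD (v ++ c :: tl) (v.length : Int) "" = c := by
    rw [PySem.List.pyGetD_natCast]; exact getD_append_len v c tl
  by_cases hO : c = "O"
  · subst hO
    rw [show (if ("O" : String) = "O" then push tl else "O" :: tl) = push tl from if_pos rfl]
    have htl : tl = List.replicate (tl.takeWhile (· == ".")).length "." ++ tl.dropWhile (· == ".") := by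
      conv_lhs => rw [← List.takeWhile_append_dropWhile (p := (· == ".")) (l := tl)]
      rw [← takeWhile_dot_eq_replicate]
    set d := (tl.takeWhile (· == ".")).length with hd
    unfold tiltStepA
    rw [hget, if_pos rfl]
    simp only []
    rw [show (v.length : Int) + 1 = ((v ++ ["O"]).length : Int) from by simp,
        show ((v ++ "O" :: tl).length : Int) = ((v ++ ["O"]).length : Int) + (tl.length : Int) from by
          simp; ring,
        show v ++ "O" :: tl = (v ++ ["O"]) ++ tl from by simp,
        inner_eq tl (v ++ ["O"]) (v.length : Int)]
    rw [show (if (tl.takeWhile (· == ".")).length = 0 then (v.length : Int)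
              else ((v ++ ["O"]).length : Int) + ((tl.takeWhile (· == ".")).length : Int) - 1)
          = (v.length : Int) + (d : Int) from by
      rw [← hd]; split_ifs with h0
      · simp [h0]
      · simp; omega]
    by_cases hz : d = 0
    · rw [if_neg (by omega)]
      rw [push]
      have h1 : tl.takeWhile (· == ".") = [] :=
        List.eq_nil_of_length_eq_zero (by rw [← hd]; exact hz)
      have h2 : tl.dropWhile (· == ".") = tl := by
        conv_rhs => rw [← List.takeWhile_append_dropWhile (p := (· == ".")) (l := tl)]
        rw [h1]; simp
      rw [h1, h2]
      simp
    · have hdpos : 0 < d := Nat.pos_of_ne_zero hz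
      rw [if_pos (by omega)]
      rw [show ((v.length : Int) + (d : Int)).toNat = v.length + d from by omega,
          show ((v.length : Int)).toNat = v.length from by omega]
      rw [List.set_append, if_neg (by simp; omega)]
      rw [show v.length + d - ((v ++ ["O"]) : List String).length = d - 1 from by simp; omega]
      conv_lhs => rw [htl]
      rw [set_replicate_last d "." "O" hdpos]
      rw [show (v ++ ["O"]) ++ (List.replicate (d - 1) "." ++ "O" :: tl.dropWhile (· == "."))
            = v ++ ("O" :: (List.replicate (d - 1) "." ++ "O" :: tl.dropWhile (· == "."))) from by simp]
      rw [List.set_append, if_neg (by simp)]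
      rw [show v.length - v.length = 0 from by omega]
      rw [push, takeWhile_dot_eq_replicate tl, ← hd]
      rw [show List.replicate d ("." : String) = "." :: List.replicate (d - 1) "." from by
        rw [show d = (d - 1) + 1 from by omega]; simp [List.replicate_succ]]
      simp [List.set]
  · unfold tiltStepA
    rw [hget, if_neg hO, if_neg hO]

-- A's outer loop, run over the index range of the suffix w, tilts exactly w
theorem A_main (w v : List String) :
    (PySem.List.pyRange (v.length : Int) ((v.length : Int) + (w.length : Int)) 1).foldr
        (fun i row => tiltStepA row i) (v ++ w)
    = v ++ tiltT w := by
  induction w generalizing v with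
  | nil =>
      simp only [List.length_nil, Nat.cast_zero, add_zero]
      rw [PySem.List.pyRange_one_eq_nil le_rfl]
      simp [tiltT]
  | cons c r ih =>
      rw [PySem.List.pyRange_one_cons (by simp)]
      rw [List.foldr_cons]
      rw [show (v.length : Int) + 1 = ((v ++ [c]).length : Int) from by simp,
          show (v.length : Int) + (((c :: r) : List String).length : Int)
             = ((v ++ [c]).length : Int) + (r.length : Int) from by simp; ring,
          show v ++ c :: r = (v ++ [c]) ++ r from by simp]
      rw [ih (v ++ [c])]
      rw [show (v ++ [c]) ++ tiltT r = v ++ c :: tiltT r from by simp]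
      rw [step_eq v c (tiltT r)]
      rw [show tiltT (c :: r) = if c = "O" then push (tiltT r) else c :: tiltT r from rfl]

-- both loop bodies compute the canonical tilt of the (possibly reversed) row
theorem core_eq (row : List String) :
    (PySem.List.pyRange ((row.length : Int) - 1) (-1) (-1)).foldl tiltStepA row
    = (row.foldl tiltStepB ([], 0, 0)).1
      ++ List.replicate (row.foldl tiltStepB ([], 0, 0)).2.1 "."
      ++ List.replicate (row.foldl tiltStepB ([], 0, 0)).2.2 "O" := by
  rw [Bfold_eq row [] 0 0]
  rw [PySem.List.pyRange_neg_one_eq_reverse]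
  rw [show (-1 : Int) + 1 = ((([] : List String)).length : Int) from by simp,
      show (row.length : Int) - 1 + 1 = ((([] : List String)).length : Int) + (row.length : Int) from by
        simp]
  rw [List.foldl_reverse]
  have h := A_main row []
  simp only [List.length_nil, Nat.cast_zero, zero_add, List.nil_append] at h ⊢
  rw [h]
  simp [pushN]

-- ===== VERDICT (by name: the statement is the Claim_ definition above) =====
theorem tilt_row_spec : Claim_equal_tilt_row := by
  intro row_in reverse _
  unfold Spec_tilt_row tilt_row tilt_row_alt
  cases reverse with
  | false => exact core_eq row_in
  | true => exact congrArg List.reverse (core_eq row_in.reverse)
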